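-- pv_equiv track=rewrite | github.com/eswarpatnana/business-card-scanner | app.py | generate_vcard
-- ===== SOURCE A (Python) =====
-- def split_phones(value):
--     if not value:
--         return []
--     return [p.strip() for p in str(value).split(",") if p.strip()]
--
-- def vcard_escape(value):
--     value = str(value or "")
--     value = value.replace("\\", "\\\\")
--     value = value.replace(";", r"\;")
--     value = value.replace(",", r"\,")
--     value = value.replace("\n", r"\n")
--     return value
--
-- def generate_vcard(contact):
--     lines = [
--         "BEGIN:VCARD",
--         "VERSION:3.0",
--         f"FN:{vcard_escape(contact.get('Name', ''))}",
--     ]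
--
--     if contact.get("Company"):
--         lines.append(f"ORG:{vcard_escape(contact['Company'])}")
--
--     if contact.get("Designation"):
--         lines.append(f"TITLE:{vcard_escape(contact['Designation'])}")
--
--     for phone in split_phones(contact.get("Phones", "")):
--         lines.append(f"TEL;TYPE=CELL:{vcard_escape(phone)}")
--
--     if contact.get("Email"):
--         lines.append(f"EMAIL;TYPE=INTERNET:{vcard_escape(contact['Email'])}")
--
--     if contact.get("Website"):
--         lines.append(f"URL:{vcard_escape(contact['Website'])}")
--
--     if contact.get("LinkedIn"):
--         lines.append(
--             f"X-SOCIALPROFILE;TYPE=linkedin:{vcard_escape(contact['LinkedIn'])}"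
--         )
--
--     if contact.get("Address"):
--         lines.append(f"ADR;TYPE=WORK:;;{vcard_escape(contact['Address'])};;;;")
--
--     lines.append("END:VCARD")
--     return "\n".join(lines)
-- ===== SOURCE B (Python) =====
-- # Recursive back-to-front construction: the card is built as one string by a
-- # recursion over the field specs (no lines list, no join), and escaping is a
-- # single character-wise pass instead of four chained replaces.
--
-- def _esc(value):
--     value = str(value or "")
--     out = []
--     for ch in value:
--         if ch == "\\":
--             out.append("\\\\")
--         elif ch == ";":
--             out.append("\\;")
--         elif ch == ",":
--             out.append("\\,")
--         elif ch == "\n":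
--             out.append("\\n")
--         else:
--             out.append(ch)
--     return "".join(out)
--
-- _SPECS = [
--     ("Company", "ORG:", ""),
--     ("Designation", "TITLE:", ""),
--     ("Phones", None, None),
--     ("Email", "EMAIL;TYPE=INTERNET:", ""),
--     ("Website", "URL:", ""),
--     ("LinkedIn", "X-SOCIALPROFILE;TYPE=linkedin:", ""),
--     ("Address", "ADR;TYPE=WORK:;;", ";;;;"),
-- ]
--
-- def _tail(contact, i):
--     """Rest of the card from spec i on, built back-to-front as one string."""
--     if i == len(_SPECS):
--         return "\nEND:VCARD"
--     key, pre, suf = _SPECS[i]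
--     rest = _tail(contact, i + 1)
--     value = contact.get(key)
--     if not value:
--         return rest
--     if pre is None:  # Phones: one TEL line per comma-separated entry
--         seg = ""
--         for p in str(value).split(","):
--             p = p.strip()
--             if p:
--                 seg += "\nTEL;TYPE=CELL:" + _esc(p)
--         return seg + rest
--     return "\n" + pre + _esc(value) + suf + rest
--
-- def generate_vcard(contact):
--     return "BEGIN:VCARD\nVERSION:3.0\nFN:" + _esc(contact.get("Name", "")) + _tail(contact, 0)
-- ===== Notes on version B (the rewrite author's own statement) =====
-- stated objective: alternative
-- what changed: B builds the card back-to-front by a recursion over a field-spec list, concatenating one output string directly (no lines list, no join), and escapes with a single character-wise pass instead of A's four chained str.replace passes.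
import Mathlib
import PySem

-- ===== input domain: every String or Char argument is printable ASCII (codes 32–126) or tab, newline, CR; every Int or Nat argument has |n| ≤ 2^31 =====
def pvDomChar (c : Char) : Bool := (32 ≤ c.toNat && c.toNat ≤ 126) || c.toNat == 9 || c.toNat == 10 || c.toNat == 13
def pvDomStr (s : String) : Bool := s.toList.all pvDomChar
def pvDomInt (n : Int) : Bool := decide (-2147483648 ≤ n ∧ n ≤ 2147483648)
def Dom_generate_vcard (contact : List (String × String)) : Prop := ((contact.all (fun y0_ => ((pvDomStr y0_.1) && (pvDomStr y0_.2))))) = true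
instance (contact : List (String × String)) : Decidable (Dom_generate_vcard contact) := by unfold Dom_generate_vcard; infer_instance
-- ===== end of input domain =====

-- B builds the card back-to-front by a recursion over the field specs, as one
-- string with no intermediate lines list and no join, and escapes in a single
-- character-wise pass instead of four chained replaces (alternative rewrite,
-- same cost). Equivalence of RETURN values.

-- assoc-list lookup = Python dict.get (first match)
def dictGet (d : List (String × String)) (k : String) : Option String :=
  (d.find? (fun p => p.1 == k)).map (·.2)

-- ===== PORT A =====
-- vcard_escape: four chained str.replace passes
def vcardEscape (v : String) : String :=
  PySem.Str.replace
    (PySem.Str.replace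
      (PySem.Str.replace
        (PySem.Str.replace v "\\" "\\\\")
        ";" "\\;")
      "," "\\,")
    "\n" "\\n"

-- split_phones: '[p.strip() for p in str(value).split(",") if p.strip()]'
def splitPhones (value : String) : List String :=
  if value = "" then []
  else ((PySem.Str.split? value ",").getD []).filterMap
    (fun p => let q := PySem.Str.strip p; if q = "" then none else some q)

def generate_vcard (contact : List (String × String)) : String :=
  let lines := ["BEGIN:VCARD", "VERSION:3.0",
                "FN:" ++ vcardEscape ((dictGet contact "Name").getD "")]
  let lines := if (dictGet contact "Company").getD "" ≠ "" then
      lines ++ ["ORG:" ++ vcardEscape ((dictGet contact "Company").getD "")] else lines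
  let lines := if (dictGet contact "Designation").getD "" ≠ "" then
      lines ++ ["TITLE:" ++ vcardEscape ((dictGet contact "Designation").getD "")] else lines
  let lines := (splitPhones ((dictGet contact "Phones").getD "")).foldl
      (fun acc phone => acc ++ ["TEL;TYPE=CELL:" ++ vcardEscape phone]) lines
  let lines := if (dictGet contact "Email").getD "" ≠ "" then
      lines ++ ["EMAIL;TYPE=INTERNET:" ++ vcardEscape ((dictGet contact "Email").getD "")] else lines
  let lines := if (dictGet contact "Website").getD "" ≠ "" then
      lines ++ ["URL:" ++ vcardEscape ((dictGet contact "Website").getD "")] else lines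
  let lines := if (dictGet contact "LinkedIn").getD "" ≠ "" then
      lines ++ ["X-SOCIALPROFILE;TYPE=linkedin:" ++ vcardEscape ((dictGet contact "LinkedIn").getD "")] else lines
  let lines := if (dictGet contact "Address").getD "" ≠ "" then
      lines ++ ["ADR;TYPE=WORK:;;" ++ vcardEscape ((dictGet contact "Address").getD "") ++ ";;;;"] else lines
  PySem.Str.join "\n" (lines ++ ["END:VCARD"])

-- ===== PORT B =====
-- _esc: single character-wise pass
def escChar (c : Char) : List Char :=
  if c = '\\' then ['\\', '\\']
  else if c = ';' then ['\\', ';']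
  else if c = ',' then ['\\', ',']
  else if c = '\n' then ['\\', 'n']
  else [c]

def escAlt (v : String) : String := String.ofList (v.toList.flatMap escChar)

-- _SPECS: key ↦ none (Phones, special) or some (line prefix, line suffix)
def vcardSpecs : List (String × Option (String × String)) :=
  [("Company", some ("ORG:", "")),
   ("Designation", some ("TITLE:", "")),
   ("Phones", none),
   ("Email", some ("EMAIL;TYPE=INTERNET:", "")),
   ("Website", some ("URL:", "")),
   ("LinkedIn", some ("X-SOCIALPROFILE;TYPE=linkedin:", "")),
   ("Address", some ("ADR;TYPE=WORK:;;", ";;;;"))]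

-- _tail: rest of the card from spec i on, built back-to-front as one string
def vcardTail (contact : List (String × String)) :
    List (String × Option (String × String)) → String
  | [] => "\nEND:VCARD"
  | (key, spec) :: rest =>
    let restS := vcardTail contact rest
    let value := (dictGet contact key).getD ""
    if value = "" then restS
    else match spec with
      | none =>
          (((PySem.Str.split? value ",").getD []).foldl
            (fun seg p =>
              let q := PySem.Str.strip p
              if q = "" then seg else seg ++ ("\nTEL;TYPE=CELL:" ++ escAlt q)) "")
          ++ restS
      | some t => "\n" ++ t.1 ++ escAlt value ++ t.2 ++ restS

def generate_vcard_alt (contact : List (String × String)) : String :=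
  "BEGIN:VCARD\nVERSION:3.0\nFN:" ++ escAlt ((dictGet contact "Name").getD "")
    ++ vcardTail contact vcardSpecs

-- ===== PRECONDITION & SPEC =====
def Spec_generate_vcard (contact : List (String × String)) (out : String) : Prop := out = generate_vcard_alt contact
instance (contact : List (String × String)) (out : String) : Decidable (Spec_generate_vcard contact out) := by unfold Spec_generate_vcard; infer_instance

-- ===== CLAIM (what is proved, stated in full; the proofs are below) =====
def Claim_equal_generate_vcard : Prop := ∀ (contact : List (String × String)), Dom_generate_vcard contact → Spec_generate_vcard contact (generate_vcard contact)

-- ===== LEMMAS AND PROOFS =====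

-- replace with a single-char needle is a character-wise flatMap
theorem go_single (c : Char) (r : List Char) : ∀ (fuel : ℕ) (l acc : List Char), l.length ≤ fuel →
    PySem.Chars.replace.go [c] r fuel l acc
      = acc.reverse ++ l.flatMap (fun x => if x = c then r else [x]) := by
  intro fuel
  induction fuel with
  | zero => intro l acc h; simp at h; simp [h, PySem.Chars.replace.go]
  | succ n ih =>
    intro l acc h
    cases l with
    | nil => simp [PySem.Chars.replace.go]
    | cons x t =>
      simp only [PySem.Chars.replace.go]
      by_cases hx : x = c
      · simp [hx, List.isPrefixOf, ih t _ (by simpa using h)]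
      · simp [List.isPrefixOf, hx, Ne.symm hx, ih t _ (by simpa using h)]

theorem replace_single (l : List Char) (c : Char) (r : List Char) :
    PySem.Chars.replace l [c] r = l.flatMap (fun x => if x = c then r else [x]) := by
  simp [PySem.Chars.replace, go_single c r l.length l [] le_rfl]

-- A's four chained replaces = B's single character-wise pass
theorem esc_eq (v : String) : vcardEscape v = escAlt v := by
  apply String.toList_inj.mp
  unfold vcardEscape escAlt
  simp only [PySem.Str.toList_replace, String.toList_ofList,
    show ("\\":String).toList = ['\\'] from rfl,
    show (";":String).toList = [';'] from rfl,
    show (",":String).toList = [','] from rfl,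
    show ("\n":String).toList = ['\n'] from rfl,
    show ("\\\\":String).toList = ['\\','\\'] from rfl,
    show ("\\;":String).toList = ['\\',';'] from rfl,
    show ("\\,":String).toList = ['\\',','] from rfl,
    show ("\\n":String).toList = ['\\','n'] from rfl,
    replace_single, List.flatMap_assoc]
  congr 1
  funext x
  by_cases h1 : x = '\\' <;> by_cases h2 : x = ';' <;> by_cases h3 : x = ',' <;>
    by_cases h4 : x = '\n' <;> simp_all [escChar]

-- glue: "\n"-prefix each line and concatenate (B's back-to-front shape)
def glue : List String → String
  | [] => ""
  | y :: ys => "\n" ++ y ++ glue ys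

theorem glue_append (a b : List String) : glue (a ++ b) = glue a ++ glue b := by
  induction a with
  | nil => simp [glue]
  | cons x xs ih => simp [glue, ih, String.append_assoc]

theorem join_cons (x : String) (xs : List String) :
    PySem.Str.join "\n" (x :: xs) = x ++ glue xs := by
  induction xs generalizing x with
  | nil =>
    apply String.toList_inj.mp
    simp [PySem.Str.toList_join, PySem.Chars.join_singleton, glue]
  | cons y ys ih =>
    apply String.toList_inj.mp
    have h2 := congrArg String.toList (ih y)
    simp only [PySem.Str.toList_join, List.map_cons, PySem.Chars.join_cons_cons,
      show ("\n":String).toList = ['\n'] from rfl] at h2 ⊢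
    simp [h2, glue, String.toList_append]

-- B's phones string-fold = glue of A's phone lines
theorem phones_fold (ps : List String) (s0 : String) :
    ps.foldl (fun seg p =>
        let q := PySem.Str.strip p
        if q = "" then seg else seg ++ ("\nTEL;TYPE=CELL:" ++ escAlt q)) s0
      = s0 ++ glue ((ps.filterMap (fun p =>
            let q := PySem.Str.strip p
            if q = "" then none else some q)).map
          (fun q => "TEL;TYPE=CELL:" ++ vcardEscape q)) := by
  induction ps generalizing s0 with
  | nil => simp [glue]
  | cons p t ih =>
    simp only [List.foldl_cons, List.filterMap_cons]
    by_cases hq : PySem.Str.strip p = ""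
    · simp [hq, ih]
    · apply String.toList_inj.mp
      simp [hq, ih, glue, esc_eq, String.toList_append]

-- ===== VERDICT (by name: the statement is the Claim_ definition above) =====
set_option maxHeartbeats 2000000 in
theorem generate_vcard_spec : Claim_equal_generate_vcard := by
  intro contact _
  unfold Spec_generate_vcard generate_vcard generate_vcard_alt vcardSpecs splitPhones
  simp only [PySem.List.foldl_append_singleton_eq_map, vcardTail]
  generalize (dictGet contact "Name").getD "" = n
  generalize hc : (dictGet contact "Company").getD "" = c
  generalize hd : (dictGet contact "Designation").getD "" = d
  generalize hp : (dictGet contact "Phones").getD "" = p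
  generalize he : (dictGet contact "Email").getD "" = e
  generalize hw : (dictGet contact "Website").getD "" = w
  generalize hl : (dictGet contact "LinkedIn").getD "" = l
  generalize ha : (dictGet contact "Address").getD "" = a
  by_cases h1 : c = "" <;> by_cases h2 : d = "" <;> by_cases h3 : p = "" <;>
    by_cases h4 : e = "" <;> by_cases h5 : w = "" <;> by_cases h6 : l = "" <;>
    by_cases h7 : a = "" <;>
    (apply String.toList_inj.mp
     simp [h1, h2, h3, h4, h5, h6, h7, join_cons, glue_append, glue, phones_fold,
       esc_eq, String.toList_append])
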